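-- pv_equiv track=rewrite | github.com/manoj0727/AI-BASED-Timetable-Scheduler | backend/optimization/engine.py | _get_consecutive_slots
-- ===== SOURCE A (Python) =====
-- from typing import List, Dict, Tuple
--
-- def _get_consecutive_slots(time_slots: List[Dict]) -> List[Tuple[Dict, Dict]]:
--     """Get pairs of consecutive time slots"""
--     consecutive = []
--     slots_by_day = {}
--
--     # Group slots by day
--     for slot in time_slots:
--         day = slot['day_of_week']
--         if day not in slots_by_day:
--             slots_by_day[day] = []
--         slots_by_day[day].append(slot)
--
--     # Find consecutive slots for each day
--     for day, day_slots in slots_by_day.items():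
--         sorted_slots = sorted(day_slots, key=lambda s: s['slot_number'])
--         for i in range(len(sorted_slots) - 1):
--             consecutive.append((sorted_slots[i], sorted_slots[i + 1]))
--
--     return consecutive
-- ===== SOURCE B (Python) =====
-- def _get_consecutive_slots(time_slots):
--     """Get pairs of consecutive time slots"""
--     first_seen = {}
--     for slot in time_slots:
--         first_seen.setdefault(slot['day_of_week'], len(first_seen))
--     ordered = sorted(time_slots, key=lambda s: (first_seen[s['day_of_week']], s['slot_number']))
--     return [(prev, cur) for prev, cur in zip(ordered, ordered[1:])
--             if prev['day_of_week'] == cur['day_of_week']]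
-- ===== Notes on version B (the rewrite author's own statement) =====
-- stated objective: alternative
-- what changed: Instead of grouping slots into per-day dict buckets and running a per-group index loop over each sorted bucket, B stable-sorts the whole list once by (first-appearance index of the day, slot_number) and makes a single adjacent-pair pass keeping pairs whose days coincide.
import Mathlib
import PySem

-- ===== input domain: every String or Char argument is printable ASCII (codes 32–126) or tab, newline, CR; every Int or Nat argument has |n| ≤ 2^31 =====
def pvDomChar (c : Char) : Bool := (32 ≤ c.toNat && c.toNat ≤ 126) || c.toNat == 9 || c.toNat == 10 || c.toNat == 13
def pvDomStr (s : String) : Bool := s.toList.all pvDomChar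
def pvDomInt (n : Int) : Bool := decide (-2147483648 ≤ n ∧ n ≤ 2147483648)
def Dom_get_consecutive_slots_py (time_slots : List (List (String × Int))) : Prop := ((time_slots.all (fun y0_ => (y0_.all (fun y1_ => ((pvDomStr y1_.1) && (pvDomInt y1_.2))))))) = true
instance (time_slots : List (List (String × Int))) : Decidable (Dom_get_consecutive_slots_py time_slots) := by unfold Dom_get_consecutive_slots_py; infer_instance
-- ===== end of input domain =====

-- B replaces A's per-day dict buckets and per-group index loops by one global stable sort
-- keyed by (first-appearance index of the day, slot_number) plus a single adjacent-pair pass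
-- (objective: alternative decomposition, similar cost).


-- shared helper: slot['day_of_week'] / slot['slot_number'] (a slot is a Python dict, ported as its
-- association list; under Pre_ the key is present and keys are unique, so getD is exact there)
def pvDay (s : List (String × Int)) : Int := PySem.Dict.getD ⟨s⟩ "day_of_week" 0
def pvSnum (s : List (String × Int)) : Int := PySem.Dict.getD ⟨s⟩ "slot_number" 0

-- ===== PORT A =====
def get_consecutive_slots_py (time_slots : List (List (String × Int))) : List ((List (String × Int)) × (List (String × Int))) :=
  -- group slots by day ('if day not in slots_by_day: … = []' then append, as in A)
  let slots_by_day : PySem.Dict Int (List (List (String × Int))) :=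
    time_slots.foldl (fun d slot =>
      let day := pvDay slot
      let d' := if d.contains day then d else d.insert day []
      d'.modify day [] (fun l => l ++ [slot])) PySem.Dict.empty
  -- for each day, sort its slots by slot_number and append the adjacent pairs by index
  slots_by_day.items.foldl (fun consecutive p =>
    let sorted_slots := PySem.List.sorted p.2 (fun s => pvSnum s)
    (PySem.List.pyRange 0 (PySem.List.len sorted_slots - 1)).foldl
      (fun acc i => acc ++ [(PySem.List.pyGetD sorted_slots i [], PySem.List.pyGetD sorted_slots (i + 1) [])])
      consecutive) []

-- ===== PORT B =====
def get_consecutive_slots_py_alt (time_slots : List (List (String × Int))) : List ((List (String × Int)) × (List (String × Int))) :=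
  let first_seen : PySem.Dict Int Int :=
    time_slots.foldl (fun d slot => d.setdefault (pvDay slot) ((d.size : Int))) PySem.Dict.empty
  let ordered := PySem.List.sorted2 time_slots (fun s => first_seen.getD (pvDay s) 0) (fun s => pvSnum s)
  (ordered.zip ordered.tail).filter (fun p => pvDay p.1 == pvDay p.2)

-- ===== PRECONDITION & SPEC =====
-- Pre_ excludes slots missing the 'day_of_week' or 'slot_number' key (Python raises KeyError there)
-- and association lists with duplicate keys, which do not denote a Python dict faithfully
-- (a dict collapses duplicates — a defensible corner no caller would specify).
def Pre_get_consecutive_slots_py (time_slots : List (List (String × Int))) : Prop :=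
  ∀ s ∈ time_slots, (s.map Prod.fst).Nodup ∧ "day_of_week" ∈ s.map Prod.fst ∧ "slot_number" ∈ s.map Prod.fst
instance (time_slots : List (List (String × Int))) : Decidable (Pre_get_consecutive_slots_py time_slots) := by unfold Pre_get_consecutive_slots_py; infer_instance

def pvWitness_get_consecutive_slots_py : (List (List (String × Int))) :=
  [[("day_of_week", 1), ("slot_number", 1)], [("day_of_week", 1), ("slot_number", 2)]]

def Spec_get_consecutive_slots_py (time_slots : List (List (String × Int))) (out : List ((List (String × Int)) × (List (String × Int)))) : Prop := out = get_consecutive_slots_py_alt time_slots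
instance (time_slots : List (List (String × Int))) (out : List ((List (String × Int)) × (List (String × Int)))) : Decidable (Spec_get_consecutive_slots_py time_slots out) := by unfold Spec_get_consecutive_slots_py; infer_instance

-- ===== CLAIM (what is proved, stated in full; the proofs are below) =====
def Claim_equal_get_consecutive_slots_py : Prop := ∀ (time_slots : List (List (String × Int))), Dom_get_consecutive_slots_py time_slots → Pre_get_consecutive_slots_py time_slots → Spec_get_consecutive_slots_py time_slots (get_consecutive_slots_py time_slots)

-- ===== LEMMAS AND PROOFS =====

-- the common normal form both ports are reduced to: days in first-appearance order,
-- each day's slots stably sorted by slot_number, adjacent pairs within each day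
def pvDays (xs : List (List (String × Int))) : List Int := PySem.Set.ofList (xs.map pvDay)
def pvGroup (xs : List (List (String × Int))) (d : Int) : List (List (String × Int)) :=
  PySem.List.sorted (xs.filter (fun s => pvDay s == d)) pvSnum
def pvAdj {α : Type} (l : List α) : List (α × α) := l.zip l.tail
def pvCanon (xs : List (List (String × Int))) : List ((List (String × Int)) × (List (String × Int))) :=
  (pvDays xs).flatMap (fun d => pvAdj (pvGroup xs d))
def pvFS (xs : List (List (String × Int))) : PySem.Dict Int Int :=
  xs.foldl (fun d slot => d.setdefault (pvDay slot) ((d.size : Int))) PySem.Dict.empty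

theorem pv_insertBy_append_left {α : Type} (before : α → α → Bool) (x : α) (L1 L2 : List α)
    (h : ∀ y ∈ L1, before x y = false) :
    PySem.List.insertBy before x (L1 ++ L2) = L1 ++ PySem.List.insertBy before x L2 := by
  induction L1 with
  | nil => simp
  | cons a t ih =>
    have ha := h a (by simp)
    simp only [List.cons_append, PySem.List.insertBy, ha]
    simp only [Bool.false_eq_true, if_false]
    rw [ih (fun y hy => h y (by simp [hy]))]

theorem pv_insertBy_append_right {α : Type} (before : α → α → Bool) (x : α) (L1 L2 : List α)
    (h : ∀ z ∈ L2, before x z = true) :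
    PySem.List.insertBy before x (L1 ++ L2) = PySem.List.insertBy before x L1 ++ L2 := by
  induction L1 with
  | nil =>
    cases L2 with
    | nil => simp
    | cons z t =>
      have := h z (by simp)
      simp only [List.nil_append, PySem.List.insertBy, this, if_true]
      rfl
  | cons a t ih =>
    by_cases hb : before x a = true
    · simp only [List.cons_append, PySem.List.insertBy, hb, if_true]
    · simp only [List.cons_append, PySem.List.insertBy, Bool.not_eq_true] at *
      simp only [hb, Bool.false_eq_true, if_false, ih, List.cons_append]

theorem pv_insertBy_congr {α : Type} (b1 b2 : α → α → Bool) (x : α) (l : List α)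
    (h : ∀ y ∈ l, b1 x y = b2 x y) :
    PySem.List.insertBy b1 x l = PySem.List.insertBy b2 x l := by
  induction l with
  | nil => rfl
  | cons a t ih =>
    have ha := h a (by simp)
    simp only [PySem.List.insertBy, ha]
    by_cases hb : b2 x a = true
    · simp [hb]
    · simp only [Bool.not_eq_true] at hb
      simp [hb, ih (fun y hy => h y (by simp [hy]))]

theorem pv_sorted_append_singleton {α κ : Type} [LT κ] [DecidableLT κ] (l : List α) (x : α) (key : α → κ) :
    PySem.List.sorted (l ++ [x]) key
      = PySem.List.insertBy (fun a b => decide (key a < key b)) x (PySem.List.sorted l key) := by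
  rw [PySem.List.sorted_eq_foldl_insertBy, PySem.List.sorted_eq_foldl_insertBy, List.foldl_append]
  rfl

theorem pv_adj_cons {α : Type} (a : α) (l : List α) (h : l ≠ []) :
    pvAdj (a :: l) = (a, l.head h) :: pvAdj l := by
  cases l with
  | nil => simp at h
  | cons b t => simp [pvAdj]

theorem pv_adj_append {α : Type} (L1 L2 : List α) (h1 : L1 ≠ []) (h2 : L2 ≠ []) :
    pvAdj (L1 ++ L2) = pvAdj L1 ++ (L1.getLast h1, L2.head h2) :: pvAdj L2 := by
  induction L1 with
  | nil => simp at h1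
  | cons a t ih =>
    cases t with
    | nil =>
      simp only [List.cons_append, List.nil_append]
      rw [pv_adj_cons a L2 h2]
      simp [pvAdj]
    | cons b t' =>
      have hne : (b :: t') ++ L2 ≠ [] := by simp
      rw [List.cons_append, pv_adj_cons a ((b :: t') ++ L2) hne,
          pv_adj_cons a (b :: t') (by simp), ih (by simp)]
      simp [List.getLast_cons]

theorem pv_foldA_eq (xs : List (List (String × Int))) (d : PySem.Dict Int (List (List (String × Int)))) :
    xs.foldl (fun d slot =>
      let day := pvDay slot
      let d' := if d.contains day then d else d.insert day []
      d'.modify day [] (fun l => l ++ [slot])) d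
    = xs.foldl (fun d slot => d.modify (pvDay slot) [] (fun l => l ++ [slot])) d := by
  induction xs generalizing d with
  | nil => rfl
  | cons s t ih =>
    simp only [List.foldl_cons]
    rw [← ih]
    congr 1
    by_cases h : d.contains (pvDay s) = true
    · simp [h]
    · simp only [h, Bool.false_eq_true, if_false, PySem.Dict.modify]
      rw [PySem.Dict.getD_insert_self, PySem.Dict.insert_insert_self,
          PySem.Dict.getD_of_not_contains _ _ (by simp [h])]

theorem pv_pyRange_shift (n : Int) :
    PySem.List.pyRange 1 n = (PySem.List.pyRange 0 (n - 1)).map (· + 1) := by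
  simp only [PySem.List.pyRange, if_neg (by norm_num : (1:Int) ≠ 0)]
  simp only [if_pos (by norm_num : (0:Int) < 1)]
  by_cases h : 1 < n
  · rw [if_pos h, if_pos (by omega : (0:Int) < n - 1)]
    have hc : (n - 1 + 1 - 1) = (n - 1 - 0 + 1 - 1) := by ring
    rw [hc, List.map_map]
    apply List.map_congr_left
    intro k _
    simp; ring
  · rw [if_neg h, if_neg (by omega : ¬ (0:Int) < n - 1)]
    simp

theorem pv_pyGetD_cons {α : Type} (a : α) (t : List α) (i : Int) (d : α) (h : 0 ≤ i) :
    PySem.List.pyGetD (a :: t) (i + 1) d = PySem.List.pyGetD t i d := by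
  obtain ⟨m, rfl⟩ := Int.eq_ofNat_of_zero_le h
  rw [show ((m : Int) + 1) = ((m + 1 : Nat) : Int) by push_cast; ring,
      PySem.List.pyGetD_natCast, PySem.List.pyGetD_natCast]
  rfl

theorem pv_range_pairs {α : Type} (ss : List α) (d0 : α) :
    (PySem.List.pyRange 0 (PySem.List.len ss - 1)).map
      (fun i => (PySem.List.pyGetD ss i d0, PySem.List.pyGetD ss (i + 1) d0)) = pvAdj ss := by
  induction ss with
  | nil => simp [PySem.List.len, pvAdj]
  | cons a t ih =>
    cases t with
    | nil => simp [PySem.List.len, pvAdj]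
    | cons b t' =>
      have hlen : (0:Int) < PySem.List.len (b :: t') := by
        simp [PySem.List.len]
      have h1 : PySem.List.len (a :: b :: t') - 1 = PySem.List.len (b :: t') := by
        simp [PySem.List.len]
      rw [h1, PySem.List.pyRange_one_cons hlen, List.map_cons,
          show (0:Int) + 1 = 1 by norm_num, pv_pyRange_shift, List.map_map]
      have hhead : PySem.List.pyGetD (a :: b :: t') 0 d0 = a := by
        rw [show (0:Int) = ((0:Nat):Int) by norm_num, PySem.List.pyGetD_natCast]; rfl
      have hsecond : PySem.List.pyGetD (a :: b :: t') 1 d0 = b := by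
        rw [show (1:Int) = ((1:Nat):Int) by norm_num, PySem.List.pyGetD_natCast]; rfl
      have hmap : (PySem.List.pyRange 0 (PySem.List.len (b :: t') - 1)).map
          ((fun i => (PySem.List.pyGetD (a :: b :: t') i d0, PySem.List.pyGetD (a :: b :: t') (i + 1) d0)) ∘ (· + 1))
          = (PySem.List.pyRange 0 (PySem.List.len (b :: t') - 1)).map
          (fun i => (PySem.List.pyGetD (b :: t') i d0, PySem.List.pyGetD (b :: t') (i + 1) d0)) := by
        apply List.map_congr_left
        intro i hi
        have h0i : 0 ≤ i := (PySem.List.mem_pyRange_one.1 hi).1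
        simp only [Function.comp_apply]
        rw [pv_pyGetD_cons _ _ _ _ h0i, pv_pyGetD_cons _ _ _ _ (by omega : (0:Int) ≤ i + 1)]
      rw [hmap, ih, hhead, hsecond]
      simp [pvAdj]

theorem pv_A_char (xs : List (List (String × Int))) :
    get_consecutive_slots_py xs = pvCanon xs := by
  unfold get_consecutive_slots_py
  rw [pv_foldA_eq]
  set dM := xs.foldl (fun d slot => d.modify (pvDay slot) [] (fun l => l ++ [slot])) PySem.Dict.empty with hdM
  have hkeys : dM.keys = pvDays xs := by
    rw [hdM, PySem.Dict.keys_foldl_modify_key xs pvDay [] (fun _ x => fun l => l ++ [x]) PySem.Dict.empty,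
        PySem.Dict.keys_empty]
    rfl
  have hnodup : dM.keys.Nodup := by
    rw [hkeys]; exact PySem.Set.nodup_ofList _
  have hgetD : ∀ c, dM.getD c [] = xs.filter (fun s => pvDay s == c) := by
    intro c
    have base := PySem.Dict.getD_foldl_modify_append (xs.map fun s => (pvDay s, s)) PySem.Dict.empty c
    rw [List.foldl_map] at base
    rw [hdM]
    rw [show (List.foldl (fun d slot => d.modify (pvDay slot) [] fun l => l ++ [slot]) PySem.Dict.empty xs)
        = (List.foldl (fun x y => x.modify (pvDay y, y).1 [] fun l => l ++ [(pvDay y, y).2]) PySem.Dict.empty xs) from rfl,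
        base]
    simp [List.filter_map, Function.comp_def]
  have hitems : dM.items = (pvDays xs).map (fun k => (k, xs.filter (fun s => pvDay s == k))) := by
    rw [PySem.Dict.items_eq_map_keys dM hnodup [], hkeys]
    apply List.map_congr_left
    intro k _
    rw [hgetD]
  -- inner loop to pvAdj
  have hinner : (fun (consecutive : List ((List (String × Int)) × (List (String × Int)))) (p : Int × List (List (String × Int))) =>
      let sorted_slots := PySem.List.sorted p.2 (fun s => pvSnum s)
      (PySem.List.pyRange 0 (PySem.List.len sorted_slots - 1)).foldl
        (fun acc i => acc ++ [(PySem.List.pyGetD sorted_slots i [], PySem.List.pyGetD sorted_slots (i + 1) [])])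
        consecutive)
      = (fun consecutive p => consecutive ++ pvAdj (PySem.List.sorted p.2 (fun s => pvSnum s))) := by
    funext acc p
    show (PySem.List.pyRange 0 _).foldl _ acc = _
    rw [show (fun (acc : List ((List (String × Int)) × (List (String × Int)))) (i : Int) =>
          acc ++ [(PySem.List.pyGetD (PySem.List.sorted p.2 (fun s => pvSnum s)) i [],
                   PySem.List.pyGetD (PySem.List.sorted p.2 (fun s => pvSnum s)) (i + 1) [])])
        = (fun acc i => acc ++ [(fun i => (PySem.List.pyGetD (PySem.List.sorted p.2 (fun s => pvSnum s)) i [],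
                   PySem.List.pyGetD (PySem.List.sorted p.2 (fun s => pvSnum s)) (i + 1) [])) i]) from rfl,
        PySem.List.foldl_append_singleton_eq_map, pv_range_pairs]
  rw [hinner]
  show List.foldl (fun consecutive p => consecutive ++ pvAdj (PySem.List.sorted p.2 fun s => pvSnum s)) [] dM.items = pvCanon xs
  rw [hitems, PySem.List.foldl_append_eq_flatMap, List.flatMap_map]
  simp only [List.nil_append]
  rfl

theorem pv_days_append (xs : List (List (String × Int))) (x : List (String × Int)) :
    pvDays (xs ++ [x]) = PySem.Set.add (pvDays xs) (pvDay x) := by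
  simp [pvDays, PySem.Set.ofList, List.foldl_append]

theorem pv_FS_items (xs : List (List (String × Int))) :
    (pvFS xs).items = (pvDays xs).zipIdx.map (fun p => (p.1, (p.2 : Int))) := by
  induction xs using List.reverseRecOn with
  | nil => rfl
  | append_singleton xs x ih =>
    have hfold : pvFS (xs ++ [x]) = (pvFS xs).setdefault (pvDay x) (((pvFS xs).size : Int)) := by
      simp [pvFS, List.foldl_append]
    rw [hfold, pv_days_append]
    have hkeys : (pvFS xs).keys = pvDays xs := by
      show ((pvFS xs).items.map Prod.fst) = _
      rw [ih, List.map_map]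
      have : (Prod.fst ∘ fun p : Int × Nat => (p.1, (p.2 : Int))) = Prod.fst := by funext p; rfl
      rw [this]
      exact List.zipIdx_map_fst 0 (pvDays xs)
    by_cases hmem : pvDay x ∈ pvDays xs
    · have hcont : (pvFS xs).contains (pvDay x) = true := by
        exact (PySem.Dict.contains_iff_mem_keys _ _).2 (by rw [hkeys]; exact hmem)
      have : PySem.Set.add (pvDays xs) (pvDay x) = pvDays xs := by
        simp [PySem.Set.add, PySem.Set.contains, hmem]
      rw [this, PySem.Dict.setdefault_of_contains _ _ hcont, ih]
    · have hcont : (pvFS xs).contains (pvDay x) = false := by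
        rw [Bool.eq_false_iff]
        intro hc
        exact hmem (by rw [← hkeys]; exact (PySem.Dict.contains_iff_mem_keys _ _).1 hc)
      have hadd : PySem.Set.add (pvDays xs) (pvDay x) = pvDays xs ++ [pvDay x] := by
        simp only [PySem.Set.add, PySem.Set.contains]
        rw [if_neg (by simp; exact hmem)]
      have hsize : (pvFS xs).size = (pvDays xs).length := by
        show (pvFS xs).items.length = _
        rw [ih]; simp
      rw [hadd, PySem.Dict.setdefault_of_not_contains _ _ hcont,
          PySem.Dict.items_insert_of_not_contains _ _ hcont]
      simp [List.zipIdx_append, ih, hsize]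

theorem pv_FS_getD (xs : List (List (String × Int))) (v : Int) (h : v ∈ pvDays xs) :
    (pvFS xs).getD v 0 = ((pvDays xs).idxOf v : Int) := by
  have hnd : (pvDays xs).Nodup := PySem.Set.nodup_ofList _
  have hkeys : (pvFS xs).keys = pvDays xs := by
    show ((pvFS xs).items.map Prod.fst) = _
    rw [pv_FS_items, List.map_map]
    have : (Prod.fst ∘ fun p : Int × Nat => (p.1, (p.2 : Int))) = Prod.fst := by funext p; rfl
    rw [this]
    exact List.zipIdx_map_fst 0 (pvDays xs)
  have hidx : (pvDays xs).idxOf v < (pvDays xs).length := List.idxOf_lt_length_iff.2 h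
  have hget : (pvDays xs)[(pvDays xs).idxOf v] = v := List.getElem_idxOf hidx
  have hmemz : (v, (pvDays xs).idxOf v) ∈ (pvDays xs).zipIdx := by
    rw [← hget]
    exact List.mem_zipIdx_iff_getElem?.2 (by simp [List.getElem?_eq_getElem hidx])
  apply PySem.Dict.getD_of_mem_items
  · rw [pv_FS_items]
    exact List.mem_map.2 ⟨_, hmemz, rfl⟩
  · rw [hkeys]; exact hnd

theorem pv_group_day (ys : List (List (String × Int))) (d : Int) (y : List (String × Int))
    (h : y ∈ pvGroup ys d) : pvDay y = d := by
  have := (PySem.List.mem_sorted _ _ _ _).1 h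
  have := (List.mem_filter.1 this).2
  exact eq_of_beq this

theorem pv_mem_days_of_mem (ys : List (List (String × Int))) (s : List (String × Int))
    (h : s ∈ ys) : pvDay s ∈ pvDays ys := by
  exact (PySem.Set.mem_ofList _ _).2 (List.mem_map.2 ⟨s, h, rfl⟩)

theorem pv_filter_eq_nil_of_not_mem (ys : List (List (String × Int))) (d : Int)
    (h : d ∉ pvDays ys) : ys.filter (fun s => pvDay s == d) = [] := by
  rw [List.filter_eq_nil_iff]
  intro s hs hbeq
  exact h (eq_of_beq hbeq ▸ pv_mem_days_of_mem ys s hs)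

theorem pv_big (D : List Int) (k1 : List (String × Int) → Int)
    (hk : ∀ s, pvDay s ∈ D → k1 s = (D.idxOf (pvDay s) : Int)) :
    ∀ ys : List (List (String × Int)), pvDays ys <+: D →
    ys.foldl (fun acc x => PySem.List.insertBy
        (fun a b => decide (k1 a < k1 b) || (!decide (k1 b < k1 a) && decide (pvSnum a < pvSnum b))) x acc) []
      = (pvDays ys).flatMap (fun d => pvGroup ys d) := by
  intro ys
  induction ys using List.reverseRecOn with
  | nil => intro _; rfl
  | append_singleton ys x ih =>
    intro hpre
    set lt2 : List (String × Int) → List (String × Int) → Bool :=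
      fun a b => decide (k1 a < k1 b) || (!decide (k1 b < k1 a) && decide (pvSnum a < pvSnum b)) with hlt2
    -- prefix for ys
    have hstep : pvDays ys <+: pvDays (ys ++ [x]) := by
      rw [pv_days_append]
      by_cases hmem : pvDay x ∈ pvDays ys
      · simp [PySem.Set.add, PySem.Set.contains, hmem]
      · simp only [PySem.Set.add, PySem.Set.contains]
        rw [if_neg (by simp; exact hmem)]
        exact List.prefix_append _ _
    have hpre' : pvDays ys <+: D := hstep.trans hpre
    have hDy : (pvDays ys).Nodup := PySem.Set.nodup_ofList _
    -- idxOf transfer along prefixes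
    have hidx : ∀ d ∈ pvDays ys, D.idxOf d = (pvDays ys).idxOf d := by
      intro d hd
      obtain ⟨rest, hrest⟩ := hpre'
      rw [← hrest, List.idxOf_append, if_pos hd]
    -- fold unrolls
    rw [List.foldl_append]
    simp only [List.foldl_cons, List.foldl_nil]
    rw [ih hpre']
    by_cases hmem : pvDay x ∈ pvDays ys
    · -- existing day
      set d0 := pvDay x with hd0
      obtain ⟨P, S, hsplit⟩ := List.append_of_mem hmem
      have hndPS : (P ++ d0 :: S).Nodup := hsplit ▸ hDy
      have hP0 : d0 ∉ P := by
        intro hc; exact (List.disjoint_of_nodup_append hndPS) hc (by simp)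
      have hS0 : d0 ∉ S := by
        have := (List.nodup_append.1 hndPS).2.1
        simp at this; exact this.1
      have hPS : ∀ d ∈ S, d ∉ P := by
        intro d hdS hdP
        exact (List.disjoint_of_nodup_append hndPS) hdP (by simp [hdS])
      -- ranks within pvDays ys
      have hrk : ∀ d ∈ pvDays ys, (pvDays ys).idxOf d =
          (P ++ d0 :: S).idxOf d := by intro d _; rw [hsplit]
      have hrk0 : (pvDays ys).idxOf d0 = P.length := by
        rw [hsplit, List.idxOf_append, if_neg hP0, List.idxOf_cons_self]
        omega
      have hrkP : ∀ d ∈ P, (pvDays ys).idxOf d < P.length := by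
        intro d hd
        rw [hsplit, List.idxOf_append, if_pos hd]
        exact List.idxOf_lt_length_iff.2 hd
      have hrkS : ∀ d ∈ S, P.length < (pvDays ys).idxOf d := by
        intro d hd
        have hne : d ≠ d0 := fun hc => hS0 (hc ▸ hd)
        rw [hsplit, List.idxOf_append, if_neg (hPS d hd), List.idxOf_cons_ne _ (Ne.symm hne)]
        omega
      -- key comparisons
      have hkx : k1 x = ((pvDays ys).idxOf d0 : Int) := by
        rw [hk x (by rw [← hd0]; exact hpre'.subset hmem), ← hd0, hidx d0 hmem]
      have hbefP : ∀ y ∈ P.flatMap (fun d => pvGroup ys d), lt2 x y = false := by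
        intro y hy
        obtain ⟨d, hdP, hyg⟩ := List.mem_flatMap.1 hy
        have hday : pvDay y = d := pv_group_day ys d y hyg
        have hdmem : d ∈ pvDays ys := by rw [hsplit]; simp [hdP]
        have hky : k1 y = ((pvDays ys).idxOf d : Int) := by
          rw [hk y (by rw [hday]; exact hpre'.subset hdmem), hday, hidx d hdmem]
        have h1 : k1 y < k1 x := by
          rw [hky, hkx, hrk0]; exact_mod_cast hrkP d hdP
        have e1 : decide (k1 x < k1 y) = false := by simp [not_lt_of_gt h1]
        have e2 : decide (k1 y < k1 x) = true := by simp [h1]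
        simp only [hlt2, e1, e2, Bool.not_true, Bool.false_and, Bool.or_false]
      have hbefS : ∀ z ∈ S.flatMap (fun d => pvGroup ys d), lt2 x z = true := by
        intro z hz
        obtain ⟨d, hdS, hzg⟩ := List.mem_flatMap.1 hz
        have hday : pvDay z = d := pv_group_day ys d z hzg
        have hdmem : d ∈ pvDays ys := by rw [hsplit]; simp [hdS]
        have hkz : k1 z = ((pvDays ys).idxOf d : Int) := by
          rw [hk z (by rw [hday]; exact hpre'.subset hdmem), hday, hidx d hdmem]
        have h1 : k1 x < k1 z := by
          rw [hkz, hkx, hrk0]; exact_mod_cast hrkS d hdS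
        have e1 : decide (k1 x < k1 z) = true := by simp [h1]
        simp only [hlt2, e1, Bool.true_or]
      have hcongr : ∀ y ∈ pvGroup ys d0, lt2 x y = decide (pvSnum x < pvSnum y) := by
        intro y hy
        have hday : pvDay y = d0 := pv_group_day ys d0 y hy
        have hky : k1 y = k1 x := by
          rw [hk y (by rw [hday]; exact hpre'.subset hmem), hday, hk x (by rw [← hd0]; exact hpre'.subset hmem), ← hd0]
        have e1 : decide (k1 x < k1 y) = false := by simp [hky]
        have e2 : decide (k1 y < k1 x) = false := by simp [hky]
        simp only [hlt2, e1, e2, Bool.not_false, Bool.true_and, Bool.false_or]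
      -- RHS days and groups
      have hdaysnew : pvDays (ys ++ [x]) = pvDays ys := by
        rw [pv_days_append]
        simp only [PySem.Set.add, PySem.Set.contains]
        rw [if_pos (by simp only [List.contains_iff_mem]; exact hd0 ▸ hmem)]
      have hgroup_ne : ∀ d, d ≠ d0 → pvGroup (ys ++ [x]) d = pvGroup ys d := by
        intro d hne
        unfold pvGroup
        congr 1
        rw [List.filter_append]
        have hxd : (pvDay x == d) = false := by
          simp only [beq_eq_false_iff_ne, ne_eq]
          exact fun hc => hne (by rw [hd0]; exact hc.symm)
        simp [List.filter, hxd]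
      have hgroup_d0 : pvGroup (ys ++ [x]) d0 = PySem.List.insertBy
          (fun a b => decide (pvSnum a < pvSnum b)) x (pvGroup ys d0) := by
        unfold pvGroup
        rw [List.filter_append]
        have hfx : List.filter (fun s => pvDay s == d0) [x] = [x] := by simp [← hd0]
        rw [hfx, pv_sorted_append_singleton]
      rw [hdaysnew, hsplit]
      simp only [List.flatMap_append, List.flatMap_cons]
      rw [pv_insertBy_append_left _ _ _ _ hbefP]
      rw [pv_insertBy_append_right _ _ _ _ hbefS]
      rw [pv_insertBy_congr lt2 (fun a b => decide (pvSnum a < pvSnum b)) x _ hcongr]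
      rw [← hgroup_d0]
      congr 1
      · exact (List.flatMap_congr (fun d hd => (hgroup_ne d (fun hc => hP0 (hc ▸ hd))).symm))
      · congr 1
        exact (List.flatMap_congr (fun d hd => (hgroup_ne d (fun hc => hS0 (hc ▸ hd))).symm))
    · -- fresh day
      set d0 := pvDay x with hd0
      have hdaysnew : pvDays (ys ++ [x]) = pvDays ys ++ [d0] := by
        rw [pv_days_append]
        simp only [PySem.Set.add, PySem.Set.contains]
        rw [if_neg (by simp; exact hmem)]
      have hprefix2 : pvDays ys ++ [d0] <+: D := hdaysnew ▸ hpre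
      have hrk0 : D.idxOf d0 = (pvDays ys).length := by
        obtain ⟨rest, hrest⟩ := hprefix2
        rw [← hrest, List.append_assoc, List.idxOf_append, if_neg hmem]
        simp
      have hbef : ∀ y ∈ (pvDays ys).flatMap (fun d => pvGroup ys d), lt2 x y = false := by
        intro y hy
        obtain ⟨d, hdm, hyg⟩ := List.mem_flatMap.1 hy
        have hday : pvDay y = d := pv_group_day ys d y hyg
        have hky : k1 y = (D.idxOf d : Int) := by
          rw [hk y (by rw [hday]; exact hpre'.subset hdm), hday]
        have hkx : k1 x = ((pvDays ys).length : Int) := by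
          rw [hk x (hprefix2.subset (by simp [← hd0])), ← hd0, hrk0]
        have hlt : D.idxOf d < (pvDays ys).length := by
          rw [hidx d hdm]; exact List.idxOf_lt_length_iff.2 hdm
        have h1 : k1 y < k1 x := by rw [hky, hkx]; exact_mod_cast hlt
        have e1 : decide (k1 x < k1 y) = false := by simp [not_lt_of_gt h1]
        have e2 : decide (k1 y < k1 x) = true := by simp [h1]
        simp only [hlt2, e1, e2, Bool.not_true, Bool.false_and, Bool.or_false]
      rw [PySem.List.insertBy_of_forall_not_before _ _ _ hbef, hdaysnew]
      simp only [List.flatMap_append, List.flatMap_cons, List.flatMap_nil]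
      have hgroup_ne : ∀ d ∈ pvDays ys, pvGroup (ys ++ [x]) d = pvGroup ys d := by
        intro d hd
        have hne : d ≠ d0 := fun hc => hmem (hc ▸ hd)
        unfold pvGroup
        congr 1
        rw [List.filter_append]
        have hxd : (pvDay x == d) = false := by
          simp only [beq_eq_false_iff_ne, ne_eq]
          exact fun hc => hne (by rw [hd0]; exact hc.symm)
        simp [List.filter, hxd]
      have hgroup_d0 : pvGroup (ys ++ [x]) d0 = [x] := by
        unfold pvGroup
        rw [List.filter_append, pv_filter_eq_nil_of_not_mem ys d0 hmem]
        have hfx : List.filter (fun s => pvDay s == d0) [x] = [x] := by simp [← hd0]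
        rw [List.nil_append, hfx]
        rfl
      rw [hgroup_d0]
      congr 1
      exact (List.flatMap_congr (fun d hd => (hgroup_ne d hd).symm))

theorem pv_ordered_eq (xs : List (List (String × Int))) :
    PySem.List.sorted2 xs (fun s => (pvFS xs).getD (pvDay s) 0) (fun s => pvSnum s)
      = (pvDays xs).flatMap (fun d => pvGroup xs d) := by
  exact pv_big (pvDays xs) (fun s => (pvFS xs).getD (pvDay s) 0)
      (fun s hs => pv_FS_getD xs (pvDay s) hs) xs (List.prefix_refl _)

theorem pv_adj_filter_self (l : List (List (String × Int))) (d : Int)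
    (h : ∀ s ∈ l, pvDay s = d) :
    (pvAdj l).filter (fun p => pvDay p.1 == pvDay p.2) = pvAdj l := by
  apply List.filter_eq_self.2
  intro p hp
  obtain ⟨p1, p2⟩ := p
  have hmem := List.of_mem_zip hp
  have h1 := h p1 hmem.1
  have h2 := h p2 (List.mem_of_mem_tail hmem.2)
  simp [h1, h2]

theorem pv_adjFilter_flat (D : List Int) (g : Int → List (List (String × Int))) (hD : D.Nodup)
    (h1 : ∀ d ∈ D, g d ≠ []) (h2 : ∀ d ∈ D, ∀ s ∈ g d, pvDay s = d) :
    (pvAdj (D.flatMap g)).filter (fun p => pvDay p.1 == pvDay p.2)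
      = D.flatMap (fun d => pvAdj (g d)) := by
  induction D with
  | nil => simp [pvAdj]
  | cons d D' ih =>
    have hgd : g d ≠ [] := h1 d (by simp)
    have hday : ∀ s ∈ g d, pvDay s = d := h2 d (by simp)
    simp only [List.flatMap_cons]
    cases D' with
    | nil =>
      simp only [List.flatMap_nil, List.append_nil]
      exact pv_adj_filter_self (g d) d hday
    | cons d' D'' =>
      have hrest : (d' :: D'').flatMap g ≠ [] := by
        simp only [List.flatMap_cons]
        exact List.append_ne_nil_of_left_ne_nil (h1 d' (by simp)) _
      rw [pv_adj_append (g d) _ hgd hrest, List.filter_append, List.filter_cons]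
      have hbound : (pvDay ((g d).getLast hgd, (((d' :: D'').flatMap g).head hrest)).1
          == pvDay ((g d).getLast hgd, (((d' :: D'').flatMap g).head hrest)).2) = false := by
        have hl : pvDay ((g d).getLast hgd) = d := hday _ (List.getLast_mem hgd)
        have hh : (((d' :: D'').flatMap g).head hrest) ∈ (d' :: D'').flatMap g :=
          List.head_mem hrest
        obtain ⟨e, heD, heg⟩ := List.mem_flatMap.1 hh
        have hhd : pvDay (((d' :: D'').flatMap g).head hrest) = e := h2 e (by simp [heD]) _ heg
        have hne : d ≠ e := by
          intro hc
          exact (List.nodup_cons.1 hD).1 (hc ▸ heD)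
        rw [hl, hhd]; simp [hne]
      rw [hbound]
      simp only [Bool.false_eq_true, if_false]
      rw [pv_adj_filter_self (g d) d hday,
          ih (List.nodup_cons.1 hD).2 (fun e he => h1 e (by simp [he])) (fun e he => h2 e (by simp [he]))]

theorem pv_B_char (xs : List (List (String × Int))) :
    get_consecutive_slots_py_alt xs = pvCanon xs := by
  show ((PySem.List.sorted2 xs (fun s => (pvFS xs).getD (pvDay s) 0) (fun s => pvSnum s)).zip
        (PySem.List.sorted2 xs (fun s => (pvFS xs).getD (pvDay s) 0) (fun s => pvSnum s)).tail).filter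
        (fun p => pvDay p.1 == pvDay p.2) = pvCanon xs
  rw [pv_ordered_eq]
  have h1 : ∀ d ∈ pvDays xs, pvGroup xs d ≠ [] := by
    intro d hd
    obtain ⟨s, hs, hsd⟩ := List.mem_map.1 ((PySem.Set.mem_ofList _ _).1 hd)
    intro hc
    rw [pvGroup, PySem.List.sorted_eq_nil_iff] at hc
    have : s ∈ xs.filter (fun s => pvDay s == d) := List.mem_filter.2 ⟨hs, by simp [hsd]⟩
    rw [hc] at this
    exact List.not_mem_nil this
  exact pv_adjFilter_flat (pvDays xs) (fun d => pvGroup xs d) (PySem.Set.nodup_ofList _)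
    h1 (fun d _ s hs => pv_group_day xs d s hs)

-- ===== VERDICT (by name: the statement is the Claim_ definition above) =====
theorem get_consecutive_slots_py_spec : Claim_equal_get_consecutive_slots_py := by
  intro xs _ _
  unfold Spec_get_consecutive_slots_py
  rw [pv_A_char, pv_B_char]
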